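-- pv_equiv track=rewrite | github.com/ColeridgeGuo/leetcode | LC_566/Reshape Matrix.py | matrixReshape_direct
-- ===== SOURCE A (Python) =====
-- from typing import List
--
-- def matrixReshape_direct(nums: List[List[int]],
--                          r: int, c: int) -> List[List[int]]:
--     if len(nums) == 0 or r * c != len(nums) * len(nums[0]):
--         return nums
--     row = col = 0
--     res = [[0] * c for _ in range(r)]
--     for i in range(len(nums)):
--         for j in range(len(nums[0])):
--             res[row][col] = nums[i][j]
--             col += 1
--             if col == c:
--                 row, col = row + 1, 0
--     return res
-- ===== SOURCE B (Python) =====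
-- from typing import List
--
-- def matrixReshape_direct(nums: List[List[int]],
--                          r: int, c: int) -> List[List[int]]:
--     if len(nums) == 0 or r * c != len(nums) * len(nums[0]):
--         return nums
--     flat = [x for row in nums for x in row]
--     return [flat[k * c:(k + 1) * c] for k in range(r)]
-- ===== Notes on version B (the rewrite author's own statement) =====
-- stated objective: simpler
-- what changed: Replaces A's single nested loop with running row/col write indices into a preallocated zero matrix by a two-phase decomposition: flatten the matrix in row-major order, then cut the flat list into r slices of width c.
-- outside the precondition, e.g. on matrixReshape_direct([[1, 2], [3]], 2, 2): A raises IndexError, B returns [[1, 2], [3]]; on matrixReshape_direct([[1, 2]], -1, -2): A raises IndexError, B returns []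
import Mathlib
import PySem

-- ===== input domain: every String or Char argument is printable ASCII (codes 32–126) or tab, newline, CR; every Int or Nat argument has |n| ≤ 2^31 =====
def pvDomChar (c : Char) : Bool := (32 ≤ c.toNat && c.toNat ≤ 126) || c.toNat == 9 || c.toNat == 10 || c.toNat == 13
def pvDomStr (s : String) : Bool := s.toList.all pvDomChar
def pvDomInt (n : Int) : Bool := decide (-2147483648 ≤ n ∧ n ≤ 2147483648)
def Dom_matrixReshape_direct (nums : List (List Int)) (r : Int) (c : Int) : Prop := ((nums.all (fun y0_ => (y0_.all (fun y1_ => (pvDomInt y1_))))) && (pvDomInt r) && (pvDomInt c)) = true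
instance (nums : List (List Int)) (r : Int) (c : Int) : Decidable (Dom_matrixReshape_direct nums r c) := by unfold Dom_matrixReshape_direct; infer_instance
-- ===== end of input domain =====

-- B replaces A's single nested write loop (running row/col indices into a preallocated zero matrix)
-- with a two-phase decomposition: flatten in row-major order, then cut into r slices of width c.
-- Equivalence is about the return value (A mutates only its own local list).

-- ===== PORT A =====
-- loop body: res[row][col] = nums[i][j]; col += 1; if col == c: row, col = row + 1, 0
-- (state (row, col, res); row and col are always ≥ 0 here, so the Int-indexed pySetD/pyGetD are exact)
def pvStepA (c : Int) (s : Int × Int × List (List Int)) (v : Int) : Int × Int × List (List Int) :=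
  let res' := PySem.List.pySetD s.2.2 s.1 (PySem.List.pySetD (PySem.List.pyGetD s.2.2 s.1 []) s.2.1 v)
  let col' := s.2.1 + 1
  if col' = c then (s.1 + 1, 0, res') else (s.1, col', res')

def matrixReshape_direct (nums : List (List Int)) (r : Int) (c : Int) : List (List Int) :=
  if nums.length = 0 ∨ r * c ≠ (nums.length : Int) * (((nums.headD []).length : Int)) then nums
  else
    let res0 := (PySem.List.pyRange 0 r 1).map (fun _ => List.replicate c.toNat 0)
    let final := (PySem.List.pyRange 0 (nums.length : Int) 1).foldl
      (fun s i => (PySem.List.pyRange 0 (((nums.headD []).length : Int)) 1).foldl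
        (fun s' j => pvStepA c s' (PySem.List.pyGetD (PySem.List.pyGetD nums i []) j 0)) s)
      (0, 0, res0)
    final.2.2

-- ===== PORT B =====
def matrixReshape_direct_alt (nums : List (List Int)) (r : Int) (c : Int) : List (List Int) :=
  if nums.length = 0 ∨ r * c ≠ (nums.length : Int) * (((nums.headD []).length : Int)) then nums
  else
    let flat := nums.flatMap (fun row => row)
    (PySem.List.pyRange 0 r 1).map (fun k => PySem.List.slice flat (some (k * c)) (some ((k + 1) * c)))

-- ===== PRECONDITION & SPEC =====
-- Pre_ excludes inputs whose guard passes but that are ragged (on rows shorter than the first A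
-- raises IndexError; on rows longer than the first, A silently drops the elements past the first
-- row's width — a corner no caller of a matrix reshape specifies, where B keeps all elements) or
-- that have both r and c negative (A raises IndexError on them).
def Pre_matrixReshape_direct (nums : List (List Int)) (r : Int) (c : Int) : Prop :=
  (nums.length = 0 ∨ r * c ≠ (nums.length : Int) * (((nums.headD []).length : Int))) ∨
  ((∀ row ∈ nums, row.length = (nums.headD []).length) ∧ ¬(r < 0 ∧ c < 0))
instance (nums : List (List Int)) (r : Int) (c : Int) : Decidable (Pre_matrixReshape_direct nums r c) := by
  unfold Pre_matrixReshape_direct; infer_instance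

def pvWitness_matrixReshape_direct : List (List Int) × Int × Int := ([[1, 2], [3, 4]], 1, 4)

def Spec_matrixReshape_direct (nums : List (List Int)) (r : Int) (c : Int) (out : List (List Int)) : Prop := out = matrixReshape_direct_alt nums r c
instance (nums : List (List Int)) (r : Int) (c : Int) (out : List (List Int)) : Decidable (Spec_matrixReshape_direct nums r c out) := by unfold Spec_matrixReshape_direct; infer_instance

-- ===== CLAIM (what is proved, stated in full; the proofs are below) =====
def Claim_equal_matrixReshape_direct : Prop := ∀ (nums : List (List Int)) (r : Int) (c : Int), Dom_matrixReshape_direct nums r c → Pre_matrixReshape_direct nums r c → Spec_matrixReshape_direct nums r c (matrixReshape_direct nums r c)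

-- ===== LEMMAS AND PROOFS =====

theorem pv_pos_inj {cn i j i' j' : Nat} (hj : j < cn) (hj' : j' < cn)
    (h : i * cn + j = i' * cn + j') : i = i' ∧ j = j' := by
  have hii : i = i' := by
    rcases Nat.lt_trichotomy i i' with hlt | he | hgt
    · exfalso
      have h1 : (i + 1) * cn ≤ i' * cn := Nat.mul_le_mul_right _ hlt
      have h2 : (i + 1) * cn = i * cn + cn := Nat.succ_mul i cn
      omega
    · exact he
    · exfalso
      have h1 : (i' + 1) * cn ≤ i * cn := Nat.mul_le_mul_right _ hgt
      have h2 : (i' + 1) * cn = i' * cn + cn := Nat.succ_mul i' cn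
      omega
  subst hii; omega

theorem pv_row_lt {rn cn i j : Nat} (hk : i * cn + j < rn * cn) : i < rn := by
  by_contra hge
  have : rn * cn ≤ i * cn := Nat.mul_le_mul_right _ (by omega)
  omega

theorem pv_set_map_range {α : Type} (n a : Nat) (f : Nat → α) (x : α) :
    ((List.range n).map f).set a x = (List.range n).map (fun i => if i = a then x else f i) := by
  apply List.ext_getElem
  · simp
  · intro i h1 h2
    simp only [List.getElem_set, List.getElem_map, List.getElem_range]
    by_cases hia : i = a
    · simp [hia]
    · rw [if_neg (fun h => hia h.symm), if_neg hia]

def pvMk (flat : List Int) (rn cn k : Nat) : List (List Int) :=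
  (List.range rn).map (fun i => (List.range cn).map (fun j => if i * cn + j < k then flat.getD (i * cn + j) 0 else 0))

-- one write step turns pvMk k into pvMk (k+1)

theorem pv_step_mk (flat : List Int) (rn cn : Nat) (row col : Nat) (hcol : col < cn)
    (hk : row * cn + col < rn * cn) (hlen : row * cn + col < flat.length) :
    PySem.List.pySetD (pvMk flat rn cn (row * cn + col)) (row : Int)
      (PySem.List.pySetD (PySem.List.pyGetD (pvMk flat rn cn (row * cn + col)) (row : Int) []) (col : Int)
        (flat.getD (row * cn + col) 0))
    = pvMk flat rn cn (row * cn + col + 1) := by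
  have hrow : row < rn := pv_row_lt hk
  set k := row * cn + col with hkdef
  rw [PySem.List.pyGetD_natCast, PySem.List.pySetD_natCast, PySem.List.pySetD_natCast]
  unfold pvMk
  rw [List.getD_eq_getElem?_getD]
  rw [List.getElem?_map, List.getElem?_range hrow]
  simp only [Option.map_some, Option.getD_some]
  rw [pv_set_map_range cn col _ _, pv_set_map_range rn row _ _]
  apply List.ext_getElem
  · simp
  · intro i h1 h2
    simp only [List.getElem_map, List.getElem_range] at *
    have hi : i < rn := by simpa using h1
    by_cases hir : i = row
    · subst hir
      apply List.ext_getElem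
      · simp
      · intro j j1 j2
        simp only [if_true, List.getElem_map, List.getElem_range] at *
        have hj : j < cn := by simpa using j2
        by_cases hjc : j = col
        · subst hjc
          rw [if_pos rfl, if_pos (by omega)]
        · rw [if_neg hjc]
          have hne : i * cn + j ≠ k := by
            intro h; exact hjc (pv_pos_inj hj hcol h).2
          by_cases hlt : i * cn + j < k
          · rw [if_pos hlt, if_pos (by omega)]
          · rw [if_neg hlt, if_neg (by omega)]
    · rw [if_neg hir]
      apply List.map_congr_left
      intro j hjmem
      have hj : j < cn := List.mem_range.mp hjmem
      have hne : i * cn + j ≠ k := by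
        intro h; exact hir (pv_pos_inj hj hcol h).1
      by_cases hlt : i * cn + j < k
      · rw [if_pos hlt, if_pos (by omega)]
      · rw [if_neg hlt, if_neg (by omega)]

theorem pv_inv (flat : List Int) (cInt : Int) (rn cn : Nat) (hc : cInt = (cn : Int)) :
    ∀ (l : List Int) (row col : Nat), col < cn → flat.drop (row * cn + col) = l →
      row * cn + col + l.length ≤ rn * cn →
      ∃ p : Int × Int,
        l.foldl (pvStepA cInt) ((row : Int), (col : Int), pvMk flat rn cn (row * cn + col)) =
          (p.1, p.2, pvMk flat rn cn (row * cn + col + l.length)) := by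
  intro l
  induction l with
  | nil =>
    intro row col _ _ _
    exact ⟨((row : Int), (col : Int)), by simp⟩
  | cons a l' ih =>
    intro row col hcol hdrop hle
    set k := row * cn + col with hkdef
    have hklen : k < flat.length := by
      by_contra hge
      rw [List.drop_eq_nil_of_le (by omega)] at hdrop
      exact (List.cons_ne_nil a l') hdrop.symm
    have ha : flat.getD k 0 = a := by
      have h0 : flat[k]? = some a := by
        rw [← Nat.add_zero k, ← List.getElem?_drop, hdrop]
        rfl
      rw [List.getD_eq_getElem?_getD, h0]
      rfl
    have hdrop' : flat.drop (k + 1) = l' := by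
      have : flat.drop (k + 1) = (flat.drop k).drop 1 := by
        rw [List.drop_drop]
      rw [this, hdrop]
      rfl
    have hk : k < rn * cn := by simp only [List.length_cons] at hle; omega
    have hle' : k + 1 + l'.length ≤ rn * cn := by simp only [List.length_cons] at hle; omega
    rw [List.foldl_cons]
    have hstep : pvStepA cInt ((row : Int), (col : Int), pvMk flat rn cn k) a =
        (if col + 1 = cn then ((row : Int) + 1, 0, pvMk flat rn cn (k + 1))
         else ((row : Int), (col : Int) + 1, pvMk flat rn cn (k + 1))) := by
      unfold pvStepA
      simp only []
      rw [← ha, pv_step_mk flat rn cn row col hcol hk hklen]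
      rw [hc]
      by_cases hcc : col + 1 = cn
      · rw [if_pos (by omega), if_pos hcc]
      · rw [if_neg (by omega), if_neg hcc]
    rw [hstep]
    by_cases hcc : col + 1 = cn
    · rw [if_pos hcc]
      have h1 : (row + 1) * cn + 0 = k + 1 := by
        rw [Nat.succ_mul]; omega
      have := ih (row + 1) 0 (by omega) (by rw [h1, hdrop']) (by have hs := Nat.succ_mul row cn; omega)
      rw [h1] at this
      obtain ⟨p, hp⟩ := this
      refine ⟨p, ?_⟩
      have hidx : k + (a :: l').length = k + 1 + l'.length := by
        simp only [List.length_cons]; omega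
      rw [hidx]; push_cast at hp ⊢; exact hp
    · rw [if_neg hcc]
      have h1 : row * cn + (col + 1) = k + 1 := by omega
      have := ih row (col + 1) (by omega) (by rw [h1, hdrop']) (by have hs := Nat.succ_mul row cn; omega)
      rw [h1] at this
      obtain ⟨p, hp⟩ := this
      refine ⟨p, ?_⟩
      have hidx : k + (a :: l').length = k + 1 + l'.length := by
        simp only [List.length_cons]; omega
      rw [hidx]; push_cast at hp ⊢; exact hp

theorem pv_flat_len (n : Nat) : ∀ (l : List (List Int)), (∀ row ∈ l, row.length = n) →
    l.flatten.length = l.length * n := by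
  intro l
  induction l with
  | nil => intro _; simp
  | cons row rest ih =>
    intro h
    simp only [List.flatten_cons, List.length_append, List.length_cons]
    rw [ih (fun x hx => h x (List.mem_cons_of_mem _ hx)), h row List.mem_cons_self, Nat.succ_mul]
    omega

theorem pv_row_eq (flat : List Int) (rn cn i : Nat) (hi : i < rn) (hlen : flat.length = rn * cn) :
    (flat.drop (i * cn)).take cn =
      (List.range cn).map (fun j => if i * cn + j < rn * cn then flat.getD (i * cn + j) 0 else 0) := by
  have hbound : (i + 1) * cn ≤ rn * cn := Nat.mul_le_mul_right _ hi
  have hs : (i + 1) * cn = i * cn + cn := Nat.succ_mul i cn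
  apply List.ext_getElem
  · simp only [List.length_take, List.length_drop, List.length_map, List.length_range]
    omega
  · intro j h1 h2
    simp only [List.length_take, List.length_drop] at h1
    have hj : j < cn := by omega
    have hidx : i * cn + j < rn * cn := by omega
    rw [List.getElem_take, List.getElem_drop]
    simp only [List.getElem_map, List.getElem_range]
    rw [if_pos hidx, List.getD_eq_getElem _ _ (by omega)]

theorem pv_mk_zero (flat : List Int) (rn cn : Nat) :
    pvMk flat rn cn 0 = (List.range rn).map (fun _ => List.replicate cn (0 : Int)) := by
  unfold pvMk
  apply List.map_congr_left
  intro i _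
  rw [show (fun j => if i * cn + j < 0 then flat.getD (i * cn + j) 0 else 0) = (fun _ : Nat => (0 : Int)) from funext (fun j => if_neg (by omega))]
  simp [List.map_const']

theorem pv_main (nums : List (List Int)) (r : Int) (c : Int)
    (hrect : ∀ row ∈ nums, row.length = (nums.headD []).length) (hneg : ¬(r < 0 ∧ c < 0)) :
    matrixReshape_direct nums r c = matrixReshape_direct_alt nums r c := by
  unfold matrixReshape_direct matrixReshape_direct_alt
  by_cases hg : nums.length = 0 ∨ r * c ≠ (nums.length : Int) * (((nums.headD []).length : Int))
  · rw [if_pos hg, if_pos hg]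
  · rw [if_neg hg, if_neg hg]
    push_neg at hg
    obtain ⟨hlen0, heq⟩ := hg
    simp only []
    set n0 := (nums.headD []).length with hn0
    set flat := nums.flatMap (fun row => row) with hflat
    have hflat' : flat = nums.flatten := List.flatMap_id'
    have hflatlen : flat.length = nums.length * n0 := by
      rw [hflat']; exact pv_flat_len n0 nums hrect
    -- A's nested fold is the fold of the step over the flattened matrix
    have hA : ∀ init : Int × Int × List (List Int),
        (PySem.List.pyRange 0 (nums.length : Int) 1).foldl
          (fun s i => (PySem.List.pyRange 0 (n0 : Int) 1).foldl
            (fun s' j => pvStepA c s' (PySem.List.pyGetD (PySem.List.pyGetD nums i []) j 0)) s)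
          init = flat.foldl (pvStepA c) init := by
      intro init
      rw [PySem.List.foldl_pyRange_zero_pyGetD' nums ([] : List Int)
        (fun s row => (PySem.List.pyRange 0 (n0 : Int) 1).foldl
          (fun s' j => pvStepA c s' (PySem.List.pyGetD row j 0)) s) init]
      rw [PySem.List.foldl_congr_mem nums _ (fun s row => row.foldl (pvStepA c) s) init ?_]
      · rw [hflat', List.foldl_flatten]
      · intro acc row hrow
        rw [show ((n0 : Int)) = (row.length : Int) from by exact_mod_cast (hrect row hrow).symm]
        exact PySem.List.foldl_pyRange_zero_pyGetD' row 0 (pvStepA c) acc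
    rw [hA]
    by_cases hf : flat = []
    · -- degenerate: no elements pass through the loop body on either side
      have hn00 : n0 = 0 := by
        have hh := hflatlen
        rw [hf] at hh
        simp only [List.length_nil] at hh
        rcases Nat.mul_eq_zero.mp hh.symm with h | h
        · exact absurd h hlen0
        · exact h
      rw [hf]
      simp only [List.foldl_nil]
      have hrc : r * c = 0 := by rw [heq, hn00]; simp
      apply List.map_congr_left
      intro k hk
      have hkr := (PySem.List.mem_pyRange_one.mp hk).1
      have hkr2 := (PySem.List.mem_pyRange_one.mp hk).2
      have hc0 : c = 0 := by
        rcases Int.mul_eq_zero.mp hrc with h | h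
        · omega
        · exact h
      rw [hc0]
      simp [PySem.List.slice, PySem.List.clampIdx]
    · -- non-degenerate: r > 0, c > 0, and the invariant gives the filled matrix
      have hn0pos : 0 < n0 := by
        rcases Nat.eq_zero_or_pos n0 with h | h
        · exfalso
          apply hf
          rw [← List.length_eq_zero_iff, hflatlen, h]
          simp
        · exact h
      have hrcpos : 0 < r * c := by
        rw [heq]
        have h1 : (0:Int) < (nums.length : Int) := by exact_mod_cast Nat.pos_of_ne_zero hlen0
        have h2 : (0:Int) < (n0 : Int) := by exact_mod_cast hn0pos
        positivity
      have hrc : 0 < r ∧ 0 < c := by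
        rcases Int.mul_pos_iff.mp hrcpos with h | h
        · exact h
        · exact absurd h hneg
      set rn := r.toNat with hrn'
      set cn := c.toNat with hcn'
      have hrn : (rn : Int) = r := Int.toNat_of_nonneg (le_of_lt hrc.1)
      have hcn : (cn : Int) = c := Int.toNat_of_nonneg (le_of_lt hrc.2)
      have hcnpos : 0 < cn := by omega
      have hflatrn : flat.length = rn * cn := by
        have h1 : ((rn * cn : Nat) : Int) = ((flat.length : Nat) : Int) := by
          push_cast
          rw [hrn, hcn, heq, hflatlen]
          push_cast
          ring
        exact_mod_cast h1.symm
      have res0eq : (PySem.List.pyRange 0 r 1).map (fun _ => List.replicate c.toNat (0:Int)) =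
          pvMk flat rn cn 0 := by
        rw [pv_mk_zero, PySem.List.pyRange_one, List.map_map]
        simp [Function.comp_def, List.map_const']
        exact ⟨rfl, Or.inr rfl⟩
      have hB : (PySem.List.pyRange 0 r 1).map
            (fun k => PySem.List.slice flat (some (k * c)) (some ((k + 1) * c))) =
          pvMk flat rn cn (rn * cn) := by
        unfold pvMk
        rw [PySem.List.pyRange_one, List.map_map]
        have h1 : (r - 0).toNat = rn := by simp [hrn']
        rw [h1]
        apply List.map_congr_left
        intro i hi
        have hi' : i < rn := List.mem_range.mp hi
        simp only [Function.comp_apply]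
        have e1 : ((0:Int) + (i : Nat)) * c = ((i * cn : Nat) : Int) := by
          rw [← hcn]; push_cast; ring
        have e2 : ((0:Int) + (i : Nat) + 1) * c = ((i * cn : Nat) : Int) + ((cn : Nat) : Int) := by
          rw [← hcn]; push_cast; ring
        rw [e1, e2, PySem.List.slice_natCast_add]
        exact pv_row_eq flat rn cn i hi' hflatrn
      rw [hB, res0eq]
      obtain ⟨p, hp⟩ := pv_inv flat c rn cn hcn.symm flat 0 0 hcnpos (by simp) (by rw [hflatrn]; omega)
      simp only [Nat.cast_zero, Nat.zero_mul, Nat.zero_add] at hp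
      rw [hp]
      simp [hflatrn]

-- ===== VERDICT (by name: the statement is the Claim_ definition above) =====
theorem matrixReshape_direct_spec : Claim_equal_matrixReshape_direct := by
  intro nums r c _ hpre
  unfold Spec_matrixReshape_direct
  rcases hpre with hg | ⟨hrect, hneg⟩
  · unfold matrixReshape_direct matrixReshape_direct_alt
    rw [if_pos hg, if_pos hg]
  · exact pv_main nums r c hrect hneg
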